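-- pv_equiv track=rewrite | github.com/no-way-labs/residue | constructions/verify.py | verify_round_maps
-- ===== SOURCE A (Python) =====
-- def verify_round_maps(m, layers):
--     """Verify via round-map composition (faster for large m).
--
--     Instead of tracing full cycles, compose the m layer permutations
--     for each color and check that the result is a single m^2-cycle.
--
--     Args:
--         m: modulus
--         layers: list of m tables, each m x m of direction strings
--
--     Returns:
--         (True, "OK") or (False, error_message)
--     """
--     n = m * m
--     pts = [(x, y) for x in range(m) for y in range(m)]
--     idx = {p: i for i, p in enumerate(pts)}
--     delta = {"I": (0, 0), "X": (1, 0), "Y": (0, 1)}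
--
--     for c in range(3):
--         # Compose round map
--         perm = list(range(n))
--         for s_layer in layers:
--             mapping = [None] * n
--             for x in range(m):
--                 for y in range(m):
--                     cell = s_layer[x][y]
--                     if isinstance(cell, tuple):
--                         d = cell[c]
--                     else:
--                         d = cell[c]
--                     dx, dy = delta[d]
--                     mapping[idx[(x, y)]] = idx[((x + dx) % m, (y + dy) % m)]
--             perm = [mapping[p] for p in perm]
--
--         # Check single cycle
--         seen = [False] * n
--         num_cycles = 0
--         for i in range(n):
--             if seen[i]:
--                 continue
--             num_cycles += 1
--             cur = i
--             while not seen[cur]: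
--                 seen[cur] = True
--                 cur = perm[cur]
--
--         if num_cycles != 1:
--             return False, f"color {c}: round map has {num_cycles} cycles, expected 1"
--
--     return True, "OK"
-- ===== SOURCE B (Python) =====
-- def verify_round_maps(m, layers):
--     """Same verification without materializing the composed permutation:
--     per color, build each layer as a flat index->index array, then count
--     orbits with a seen[] array, advancing by threading the index through
--     every layer's array in turn."""
--     n = m * m
--     for c in range(3):
--         steps = []
--         for s_layer in layers:
--             mp = []
--             for x in range(m):
--                 row = s_layer[x]
--                 for y in range(m):
--                     ch = row[y][c]
--                     if ch == "X":
--                         mp.append(((x + 1) % m) * m + y)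
--                     elif ch == "Y":
--                         mp.append(x * m + (y + 1) % m)
--                     else:
--                         mp.append(x * m + y)
--             steps.append(mp)
--         seen = [False] * n
--         num_cycles = 0
--         for i in range(n):
--             if seen[i]:
--                 continue
--             num_cycles += 1
--             cur = i
--             while not seen[cur]:
--                 seen[cur] = True
--                 for mp in steps:
--                     cur = mp[cur]
--         if num_cycles != 1:
--             return False, f"color {c}: round map has {num_cycles} cycles, expected 1"
--     return True, "OK"
-- ===== Notes on version B (the rewrite author's own statement) =====
-- stated objective: alternative
-- what changed: B never materializes the composed round-map permutation (and drops A's pts list, idx dict and delta dict): per color it builds one flat index->index array per layer by pure index arithmetic and counts orbits by threading the current index through every layer's array on the fly.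
import Mathlib
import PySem

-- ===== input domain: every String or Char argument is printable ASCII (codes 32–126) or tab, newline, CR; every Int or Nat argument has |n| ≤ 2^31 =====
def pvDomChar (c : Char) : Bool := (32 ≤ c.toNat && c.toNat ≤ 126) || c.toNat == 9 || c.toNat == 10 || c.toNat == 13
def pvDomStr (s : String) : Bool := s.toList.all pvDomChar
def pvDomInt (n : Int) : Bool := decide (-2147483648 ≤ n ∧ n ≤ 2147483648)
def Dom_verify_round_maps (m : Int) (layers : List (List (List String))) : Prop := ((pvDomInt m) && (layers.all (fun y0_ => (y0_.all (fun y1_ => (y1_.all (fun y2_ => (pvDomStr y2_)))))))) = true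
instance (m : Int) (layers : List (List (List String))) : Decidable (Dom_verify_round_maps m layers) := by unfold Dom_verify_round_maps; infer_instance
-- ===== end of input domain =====

-- B avoids materializing the composed round-map permutation: per color it keeps one flat
-- index→index array per layer and counts orbits by threading the index through the layers
-- on the fly, replacing A's tuple/dict machinery by index arithmetic (objective: alternative).
-- Neither program mutates its arguments.

-- ===== PORT A =====
-- delta = {"I": (0,0), "X": (1,0), "Y": (0,1)}; Python's 1-char strings d = cell[c] are ported as Char.
def vrmDelta : PySem.Dict Char (Int × Int) :=
  PySem.Dict.ofList [('I', ((0 : Int), (0 : Int))), ('X', (1, 0)), ('Y', (0, 1))]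

-- pts = [(x, y) for x in range(m) for y in range(m)]
def vrmPts (m : Int) : List (Int × Int) :=
  (PySem.List.pyRange 0 m).flatMap (fun x => (PySem.List.pyRange 0 m).map (fun y => (x, y)))

-- idx = {p: i for i, p in enumerate(pts)}
def vrmIdx (m : Int) : PySem.Dict (Int × Int) Int :=
  (PySem.List.enumerate (vrmPts m)).foldl (fun d ip => d.insert ip.2 ip.1) PySem.Dict.empty

-- the inner double loop building mapping = [None] * n and filling it; the defaults of
-- pyGetD / Dict.getD are reached only outside Pre_ (Python raises Index/KeyError there).
-- A's isinstance branch does the same d = cell[c] in both arms and is ported once.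
def vrmMapping (m c : Int) (idx : PySem.Dict (Int × Int) Int) (s_layer : List (List String)) :
    List (Option Int) :=
  (PySem.List.pyRange 0 m).foldl (fun mapping x =>
    (PySem.List.pyRange 0 m).foldl (fun mapping y =>
      let cell := PySem.List.pyGetD (PySem.List.pyGetD s_layer x []) y ""
      let d := PySem.List.pyGetD cell.toList c 'I'
      let dd := PySem.Dict.getD vrmDelta d (0, 0)
      PySem.List.pySetD mapping (PySem.Dict.getD idx (x, y) 0)
        (some (PySem.Dict.getD idx (PySem.Int.mod (x + dd.1) m, PySem.Int.mod (y + dd.2) m) 0)))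
      mapping)
    (List.replicate (m * m).toNat none)

-- perm = list(range(n)); for s_layer in layers: perm = [mapping[p] for p in perm]
-- (entries carried as Option Int: A's ints are `some`, the unfilled None entries `none`).
def vrmCompose (m c : Int) (layers : List (List (List String))) : List (Option Int) :=
  layers.foldl (fun perm s_layer =>
    let mapping := vrmMapping m c (vrmIdx m) s_layer
    perm.map (fun p => p.bind (fun q => PySem.List.pyGetD mapping q none)))
    ((PySem.List.pyRange 0 (m * m)).map some)

-- while not seen[cur]: seen[cur] = True; cur = perm[cur]   (fuel only bounds the loop;
-- every continuing step marks a fresh cell, so seen.length + 1 fuel is never exhausted)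
def vrmWalkA (perm : List (Option Int)) : Nat → List Bool → Int → List Bool
  | 0, seen, _ => seen
  | fuel + 1, seen, cur =>
    if PySem.List.pyGetD seen cur true then seen
    else vrmWalkA perm fuel (PySem.List.pySetD seen cur true)
      ((PySem.List.pyGetD perm cur none).getD 0)

-- the seen[] / num_cycles loop of A
def vrmCountA (perm : List (Option Int)) (n : Int) : Int :=
  ((PySem.List.pyRange 0 n).foldl (fun st i =>
      if PySem.List.pyGetD st.1 i true then st
      else (vrmWalkA perm (st.1.length + 1) st.1 i, st.2 + 1))
    (List.replicate n.toNat false, (0 : Int))).2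

-- for c in range(3) with early return
def vrmColorsA (m : Int) (layers : List (List (List String))) : List Int → Bool × String
  | [] => (true, "OK")
  | c :: rest =>
    let num := vrmCountA (vrmCompose m c layers) (m * m)
    if num ≠ 1 then
      (false, "color " ++ PySem.Int.toStr c ++ ": round map has " ++ PySem.Int.toStr num
        ++ " cycles, expected 1")
    else vrmColorsA m layers rest

def verify_round_maps (m : Int) (layers : List (List (List String))) : Bool × String :=
  vrmColorsA m layers (PySem.List.pyRange 0 3)

-- ===== PORT B =====
-- one layer as a flat index→index array, built by appending in x,y order
def vrmStepB (m c : Int) (s_layer : List (List String)) : List Int :=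
  (PySem.List.pyRange 0 m).foldl (fun mp x =>
    let row := PySem.List.pyGetD s_layer x []
    (PySem.List.pyRange 0 m).foldl (fun mp y =>
      let ch := PySem.List.pyGetD (PySem.List.pyGetD row y "").toList c 'I'
      mp ++ [if ch = 'X' then PySem.Int.mod (x + 1) m * m + y
             else if ch = 'Y' then x * m + PySem.Int.mod (y + 1) m
             else x * m + y])
      mp)
    []

-- for mp in steps: cur = mp[cur]
def vrmThread (steps : List (List Int)) (cur : Int) : Int :=
  steps.foldl (fun cur mp => PySem.List.pyGetD mp cur 0) cur

def vrmWalkB (steps : List (List Int)) : Nat → List Bool → Int → List Bool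
  | 0, seen, _ => seen
  | fuel + 1, seen, cur =>
    if PySem.List.pyGetD seen cur true then seen
    else vrmWalkB steps fuel (PySem.List.pySetD seen cur true) (vrmThread steps cur)

def vrmCountB (steps : List (List Int)) (n : Int) : Int :=
  ((PySem.List.pyRange 0 n).foldl (fun st i =>
      if PySem.List.pyGetD st.1 i true then st
      else (vrmWalkB steps (st.1.length + 1) st.1 i, st.2 + 1))
    (List.replicate n.toNat false, (0 : Int))).2

def vrmColorsB (m : Int) (layers : List (List (List String))) : List Int → Bool × String
  | [] => (true, "OK")
  | c :: rest =>
    let steps := layers.map (vrmStepB m c)       -- steps.append(mp) loop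
    let num := vrmCountB steps (m * m)
    if num ≠ 1 then
      (false, "color " ++ PySem.Int.toStr c ++ ": round map has " ++ PySem.Int.toStr num
        ++ " cycles, expected 1")
    else vrmColorsB m layers rest

def verify_round_maps_alt (m : Int) (layers : List (List (List String))) : Bool × String :=
  vrmColorsB m layers (PySem.List.pyRange 0 3)

-- ===== PRECONDITION & SPEC =====
def vrmGoodChar (ch : Char) : Bool := ch = 'I' || ch = 'X' || ch = 'Y'

def vrmGoodCell (s : String) : Bool :=
  match s.toList with
  | a :: b :: c :: _ => vrmGoodChar a && vrmGoodChar b && vrmGoodChar c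
  | _ => false

def vrmWF (m : Int) (layers : List (List (List String))) : Bool :=
  layers.all fun layer =>
    decide (m.toNat ≤ layer.length) &&
      (layer.take m.toNat).all fun row =>
        decide (m.toNat ≤ row.length) && (row.take m.toNat).all vrmGoodCell

-- Pre_ excludes inputs where A raises (tables with a missing row/cell or a direction char
-- outside {I,X,Y} at a reached color: Index/Key/TypeError), and — a narrowing — tables that
-- are malformed only at a color position A never reaches because an earlier color already
-- failed: there A happens to return that earlier failure; Pre_ asks the docstring's shape
-- (full m×m tables of {I,X,Y} strings of length ≥ 3) whenever m > 0 and layers ≠ [].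
def Pre_verify_round_maps (m : Int) (layers : List (List (List String))) : Prop :=
  layers = [] ∨ m = 0 ∨ (0 < m ∧ vrmWF m layers = true)
instance (m : Int) (layers : List (List (List String))) :
    Decidable (Pre_verify_round_maps m layers) := by unfold Pre_verify_round_maps; infer_instance

def pvWitness_verify_round_maps : Int × List (List (List String)) := (1, [[["III"]]])

def Spec_verify_round_maps (m : Int) (layers : List (List (List String))) (out : Bool × String) :
    Prop := out = verify_round_maps_alt m layers
instance (m : Int) (layers : List (List (List String))) (out : Bool × String) :
    Decidable (Spec_verify_round_maps m layers out) := by unfold Spec_verify_round_maps; infer_instance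

-- ===== CLAIM (what is proved, stated in full; the proofs are below) =====
def Claim_equal_verify_round_maps : Prop :=
  ∀ (m : Int) (layers : List (List (List String))), Dom_verify_round_maps m layers →
    Pre_verify_round_maps m layers →
    Spec_verify_round_maps m layers (verify_round_maps m layers)

-- ===== LEMMAS AND PROOFS =====

-- proof-side abbreviations (not used by the ports)
def vrmChar (c : Int) (s_layer : List (List String)) (x y : Int) : Char :=
  PySem.List.pyGetD (PySem.List.pyGetD (PySem.List.pyGetD s_layer x []) y "").toList c 'I'

def vrmTgt (m c : Int) (s_layer : List (List String)) (x y : Int) : Int :=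
  if vrmChar c s_layer x y = 'X' then PySem.Int.mod (x + 1) m * m + y
  else if vrmChar c s_layer x y = 'Y' then x * m + PySem.Int.mod (y + 1) m
  else x * m + y

lemma vrm_len_flatMap {α : Type} (n M : Nat) (blk : Nat → List α) (h : ∀ x, (blk x).length = M) :
    ((List.range n).flatMap blk).length = n * M := by
  simp [List.length_flatMap, h, List.map_const', List.sum_replicate, smul_eq_mul]

lemma vrm_flatMap_getElem? {α : Type} (n M : Nat) (blk : Nat → List α)
    (h : ∀ x, (blk x).length = M) (x y : Nat) (hx : x < n) (hy : y < M) :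
    ((List.range n).flatMap blk)[x * M + y]? = (blk x)[y]? := by
  induction n with
  | zero => omega
  | succ n ih =>
    rw [List.range_succ, List.flatMap_append]
    rcases Nat.lt_or_ge x n with hxn | hxn
    · rw [List.getElem?_append_left]
      · exact ih hxn
      · rw [vrm_len_flatMap n M blk h]
        calc x * M + y < x * M + M := by omega
          _ = (x + 1) * M := by ring
          _ ≤ n * M := Nat.mul_le_mul_right M (by omega)
    · have hxe : x = n := by omega
      subst hxe
      rw [List.getElem?_append_right (by rw [vrm_len_flatMap x M blk h]; omega)]
      rw [vrm_len_flatMap x M blk h]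
      simp

lemma vrm_pyRange_cast (m : Int) :
    PySem.List.pyRange 0 m = (List.range m.toNat).map (fun (k : Nat) => (k : Int)) := by
  rw [PySem.List.pyRange_one]
  norm_num

lemma vrm_pts_eq (m : Int) :
    vrmPts m = (List.range m.toNat).flatMap
      (fun (x : Nat) => (List.range m.toNat).map (fun (y : Nat) => ((x : Int), (y : Int)))) := by
  unfold vrmPts
  rw [vrm_pyRange_cast]
  simp only [List.flatMap_map, List.map_map]
  rfl

lemma vrm_pts_nodup (m : Int) : (vrmPts m).Nodup := by
  rw [vrm_pts_eq, List.nodup_flatMap]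
  constructor
  · intro x _
    exact List.nodup_range.map (fun a b h => by simpa using congrArg Prod.snd h)
  · refine List.pairwise_lt_range.imp ?_
    intro a b hab
    simp only [Function.onFun, List.disjoint_left]
    intro p hp hq
    simp only [List.mem_map] at hp hq
    obtain ⟨y1, _, rfl⟩ := hp
    obtain ⟨y2, _, h2⟩ := hq
    have := congrArg Prod.fst h2
    simp at this
    omega

lemma vrm_mod_small {a m : Int} (h0 : 0 ≤ a) (h1 : a < m) : PySem.Int.mod a m = a := by
  rw [PySem.Int.mod_eq_emod_of_pos (by omega)]
  exact Int.emod_eq_of_lt h0 h1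

lemma vrm_idx_getD (m : Int) (hm : 0 < m) (x y : Int) (hx0 : 0 ≤ x) (hx : x < m)
    (hy0 : 0 ≤ y) (hy : y < m) :
    PySem.Dict.getD (vrmIdx m) (x, y) 0 = x * m + y := by
  have hblk : ∀ xn : Nat,
      ((List.range m.toNat).map (fun (yn : Nat) => ((xn : Int), (yn : Int)))).length
        = m.toNat := by
    intro xn; simp
  have hitems : (vrmIdx m).items
      = (PySem.List.enumerate (vrmPts m)).map (fun a => (a.2, a.1)) := by
    unfold vrmIdx
    rw [PySem.Dict.items_foldl_insert_fresh (PySem.List.enumerate (vrmPts m))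
      (fun a => a.2) (fun a => a.1) PySem.Dict.empty
      (fun a _ => PySem.Dict.contains_empty _)
      (by rw [PySem.List.map_snd_enumerate]; exact vrm_pts_nodup m)]
    rfl
  have hnodup : (vrmIdx m).keys.Nodup := by
    unfold vrmIdx
    exact PySem.Dict.nodup_keys_foldl_insert_key (κ := Int × Int) (ν := Int)
      (PySem.List.enumerate (vrmPts m)) (fun a => a.2) (fun _ ip => ip.1) PySem.Dict.empty
      PySem.Dict.nodup_keys_empty
  set M := m.toNat with hM
  have hmM : m = (M : Int) := by omega
  set xn := x.toNat
  set yn := y.toNat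
  have hxn : x = (xn : Int) := by omega
  have hyn : y = (yn : Int) := by omega
  have hxnM : xn < M := by omega
  have hynM : yn < M := by omega
  have hlen : (vrmPts m).length = M * M := by
    rw [vrm_pts_eq]; exact vrm_len_flatMap M M _ hblk
  have hk : xn * M + yn < (vrmPts m).length := by
    rw [hlen]
    calc xn * M + yn < xn * M + M := by omega
      _ = (xn + 1) * M := by ring
      _ ≤ M * M := Nat.mul_le_mul_right M (by omega)
  have hget : (vrmPts m)[xn * M + yn]'hk = (x, y) := by
    have h? : (vrmPts m)[xn * M + yn]? = some ((xn : Int), (yn : Int)) := by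
      rw [vrm_pts_eq, vrm_flatMap_getElem? M M _ hblk xn yn hxnM hynM]
      simp [hynM]
    rw [List.getElem?_eq_getElem hk] at h?
    rw [hxn, hyn]
    exact Option.some.inj h?
  have hmem : ((x, y), x * m + y) ∈ (vrmIdx m).items := by
    rw [hitems]
    refine List.mem_map.mpr ⟨((x * m + y : Int), (x, y)), ?_, rfl⟩
    rw [PySem.List.mem_enumerate_iff]
    refine ⟨xn * M + yn, hk, ?_⟩
    rw [hget]
    have : (0 : Int) + ((xn * M + yn : Nat) : Int) = x * m + y := by
      rw [hxn, hyn, hmM]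
      push_cast
      ring
    rw [this]
  exact PySem.Dict.getD_of_mem_items _ hmem hnodup 0

lemma vrm_getD_foldl_setD {α : Type} (g : Nat → α) :
    ∀ (idxs : List Nat) (init : List α) (d : α) (j : Nat),
      (∀ i ∈ idxs, i < init.length) →
      PySem.List.pyGetD (idxs.foldl (fun l (i : Nat) => PySem.List.pySetD l (i : Int) (g i)) init)
          (j : Int) d
        = if j ∈ idxs then g j else PySem.List.pyGetD init (j : Int) d := by
  intro idxs
  induction idxs with
  | nil => intro init d j _; simp
  | cons i t ih =>
    intro init d j hlt
    rw [List.foldl_cons]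
    have hlen : (PySem.List.pySetD init (i : Int) (g i)).length = init.length :=
      PySem.List.length_pySetD init (i : Int) (g i)
    rw [ih (PySem.List.pySetD init (i : Int) (g i)) d j
      (fun a ha => by rw [hlen]; exact hlt a (List.mem_cons_of_mem i ha))]
    by_cases hjt : j ∈ t
    · simp [hjt]
    · simp only [hjt, if_false]
      rw [PySem.List.pyGetD_pySetD_natCast init i j (g i) d (hlt i (List.mem_cons_self))]
      by_cases hji : j = i
      · subst hji; simp
      · simp [hji, hjt]

lemma vrm_mapping_getD (m c : Int) (s_layer : List (List String)) (hm : 0 < m)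
    (xn yn : Nat) (hx : xn < m.toNat) (hy : yn < m.toNat) :
    PySem.List.pyGetD (vrmMapping m c (vrmIdx m) s_layer) ((xn * m.toNat + yn : Nat) : Int) none
      = some (let dd := PySem.Dict.getD vrmDelta (vrmChar c s_layer xn yn) (0, 0)
              PySem.Dict.getD (vrmIdx m)
                (PySem.Int.mod ((xn : Int) + dd.1) m, PySem.Int.mod ((yn : Int) + dd.2) m) 0) := by
  set M := m.toNat with hMdef
  have hmM : m = (M : Int) := by omega
  set g : Nat → Option Int := fun j =>
    some (let dd := PySem.Dict.getD vrmDelta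
            (vrmChar c s_layer ((j / M : Nat) : Int) ((j % M : Nat) : Int)) (0, 0)
          PySem.Dict.getD (vrmIdx m)
            (PySem.Int.mod (((j / M : Nat) : Int) + dd.1) m,
             PySem.Int.mod (((j % M : Nat) : Int) + dd.2) m) 0) with hg
  set idxs : List Nat := (List.range M).flatMap
    (fun xn => (List.range M).map (fun yn => xn * M + yn)) with hidxs
  have hrw : vrmMapping m c (vrmIdx m) s_layer
      = idxs.foldl (fun l (i : Nat) => PySem.List.pySetD l (i : Int) (g i))
          (List.replicate (m * m).toNat none) := by
    unfold vrmMapping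
    rw [vrm_pyRange_cast, List.foldl_map, hidxs, List.foldl_flatMap]
    simp only [List.foldl_map]
    apply PySem.List.foldl_congr_mem
    intro acc a ha
    apply PySem.List.foldl_congr_mem
    intro acc2 b hb
    have haM : a < M := List.mem_range.mp ha
    have hbM : b < M := List.mem_range.mp hb
    have hdiv : (a * M + b) / M = a := by
      rw [Nat.mul_comm, Nat.mul_add_div (by omega), Nat.div_eq_of_lt hbM, Nat.add_zero]
    have hmod : (a * M + b) % M = b := by
      rw [Nat.mul_comm, Nat.mul_add_mod, Nat.mod_eq_of_lt hbM]
    simp only [hg, hdiv, hmod, vrmChar]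
    rw [vrm_idx_getD m hm a b (by positivity) (by omega) (by positivity) (by omega)]
    have : ((a * M + b : Nat) : Int) = (a : Int) * m + (b : Int) := by
      rw [hmM]; push_cast; ring
    rw [this]
  rw [hrw]
  rw [vrm_getD_foldl_setD g idxs _ none (xn * M + yn) ?_]
  · have hmem : xn * M + yn ∈ idxs := by
      rw [hidxs]
      exact List.mem_flatMap.mpr ⟨xn, List.mem_range.mpr hx,
        List.mem_map.mpr ⟨yn, List.mem_range.mpr hy, rfl⟩⟩
    rw [if_pos hmem, hg]
    have hdiv : (xn * M + yn) / M = xn := by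
      rw [Nat.mul_comm, Nat.mul_add_div (by omega), Nat.div_eq_of_lt hy, Nat.add_zero]
    have hmod : (xn * M + yn) % M = yn := by
      rw [Nat.mul_comm, Nat.mul_add_mod, Nat.mod_eq_of_lt hy]
    simp only [hdiv, hmod]
  · intro i hi
    rw [hidxs] at hi
    obtain ⟨a, ha, hmapmem⟩ := List.mem_flatMap.mp hi
    obtain ⟨b, hb, rfl⟩ := List.mem_map.mp hmapmem
    have haM : a < M := List.mem_range.mp ha
    have hbM : b < M := List.mem_range.mp hb
    have hN : (m * m).toNat = M * M := by rw [hmM]; omega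
    rw [List.length_replicate, hN]
    calc a * M + b < a * M + M := by omega
      _ = (a + 1) * M := by ring
      _ ≤ M * M := Nat.mul_le_mul_right M (by omega)

lemma vrm_mapping_eq_tgt (m c : Int) (s_layer : List (List String)) (hm : 0 < m)
    (xn yn : Nat) (hx : xn < m.toNat) (hy : yn < m.toNat)
    (hgood : vrmGoodChar (vrmChar c s_layer xn yn) = true) :
    PySem.List.pyGetD (vrmMapping m c (vrmIdx m) s_layer) ((xn * m.toNat + yn : Nat) : Int) none
      = some (vrmTgt m c s_layer xn yn) := by
  have hx' : ((xn : Int)) < m := by omega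
  have hy' : ((yn : Int)) < m := by omega
  have hx0 : (0 : Int) ≤ xn := by positivity
  have hy0 : (0 : Int) ≤ yn := by positivity
  rw [vrm_mapping_getD m c s_layer hm xn yn hx hy]
  unfold vrmTgt
  set ch := vrmChar c s_layer (xn : Int) (yn : Int) with hch
  simp only [vrmGoodChar, Bool.or_eq_true, decide_eq_true_eq] at hgood
  rcases hgood with (h | h) | h <;> rw [h]
  · have hdd : PySem.Dict.getD vrmDelta 'I' (0, 0) = ((0 : Int), (0 : Int)) := by decide
    rw [hdd]
    simp only [add_zero]
    rw [vrm_mod_small hx0 hx', vrm_mod_small hy0 hy',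
      vrm_idx_getD m hm _ _ hx0 hx' hy0 hy']
    simp
  · have hdd : PySem.Dict.getD vrmDelta 'X' (0, 0) = ((1 : Int), (0 : Int)) := by decide
    rw [hdd]
    simp only [add_zero]
    rw [vrm_mod_small hy0 hy',
      vrm_idx_getD m hm _ _ (PySem.Int.mod_nonneg _ hm) (PySem.Int.mod_lt _ hm) hy0 hy']
    simp
  · have hdd : PySem.Dict.getD vrmDelta 'Y' (0, 0) = ((0 : Int), (1 : Int)) := by decide
    rw [hdd]
    simp only [add_zero]
    rw [vrm_mod_small hx0 hx',
      vrm_idx_getD m hm _ _ hx0 hx' (PySem.Int.mod_nonneg _ hm) (PySem.Int.mod_lt _ hm)]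
    simp

lemma vrm_stepB_eq (m c : Int) (s_layer : List (List String)) :
    vrmStepB m c s_layer = (List.range m.toNat).flatMap
      (fun (xn : Nat) => (List.range m.toNat).map
        (fun (yn : Nat) => vrmTgt m c s_layer (xn : Int) (yn : Int))) := by
  unfold vrmStepB
  rw [vrm_pyRange_cast]
  simp only [List.foldl_map]
  rw [PySem.List.foldl_congr_mem _ _
    (fun (mp : List Int) (xn : Nat) => mp ++ (List.range m.toNat).map
      (fun (yn : Nat) => vrmTgt m c s_layer (xn : Int) (yn : Int))) []
    (fun acc x _ => by
      exact PySem.List.foldl_congr_mem _ _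
        (fun (mp : List Int) (yn : Nat) => mp ++ [vrmTgt m c s_layer (x : Int) (yn : Int)]) acc
        (fun acc2 y _ => rfl) ▸
        PySem.List.foldl_append_singleton_eq_map
          (fun (yn : Nat) => vrmTgt m c s_layer (x : Int) (yn : Int)) (List.range m.toNat) acc)]
  rw [PySem.List.foldl_append_eq_flatMap]
  simp

lemma vrm_stepB_getD (m c : Int) (s_layer : List (List String))
    (xn yn : Nat) (hx : xn < m.toNat) (hy : yn < m.toNat) :
    PySem.List.pyGetD (vrmStepB m c s_layer) ((xn * m.toNat + yn : Nat) : Int) 0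
      = vrmTgt m c s_layer (xn : Int) (yn : Int) := by
  rw [vrm_stepB_eq, PySem.List.pyGetD_natCast, List.getD_eq_getElem?_getD,
    vrm_flatMap_getElem? m.toNat m.toNat _ (fun x => by simp) xn yn hx hy]
  simp [hy]

lemma vrm_tgt_range (m c : Int) (s_layer : List (List String)) (hm : 0 < m) (x y : Int)
    (hx0 : 0 ≤ x) (hx : x < m) (hy0 : 0 ≤ y) (hy : y < m) :
    0 ≤ vrmTgt m c s_layer x y ∧ vrmTgt m c s_layer x y < m * m := by
  unfold vrmTgt
  split_ifs
  · have h1 := PySem.Int.mod_nonneg (x + 1) hm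
    have h2 := PySem.Int.mod_lt (x + 1) hm
    exact ⟨by positivity, by nlinarith⟩
  · have h1 := PySem.Int.mod_nonneg (y + 1) hm
    have h2 := PySem.Int.mod_lt (y + 1) hm
    exact ⟨by positivity, by nlinarith⟩
  · exact ⟨by positivity, by nlinarith⟩

lemma vrm_good_char (m c : Int) (layers : List (List (List String))) (hm : 0 < m)
    (hWF : vrmWF m layers = true) (hc : c = 0 ∨ c = 1 ∨ c = 2)
    (l : List (List String)) (hl : l ∈ layers) (xn yn : Nat) (hx : xn < m.toNat)
    (hy : yn < m.toNat) : vrmGoodChar (vrmChar c l xn yn) = true := by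
  unfold vrmWF at hWF
  rw [List.all_eq_true] at hWF
  have hlayer := hWF l hl
  rw [Bool.and_eq_true, decide_eq_true_eq, List.all_eq_true] at hlayer
  obtain ⟨hlen, hrows⟩ := hlayer
  have hxlen : xn < l.length := by omega
  have hrowmem : l[xn] ∈ l.take m.toNat := by
    have h1 : xn < (l.take m.toNat).length := by simp; omega
    have h2 : (l.take m.toNat)[xn] = l[xn] := List.getElem_take
    exact h2 ▸ List.getElem_mem h1
  have hrow := hrows _ hrowmem
  rw [Bool.and_eq_true, decide_eq_true_eq, List.all_eq_true] at hrow
  obtain ⟨hrlen, hcells⟩ := hrow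
  have hylen : yn < l[xn].length := by omega
  have hcellmem : l[xn][yn] ∈ l[xn].take m.toNat := by
    have h1 : yn < (l[xn].take m.toNat).length := by simp; omega
    have h2 : (l[xn].take m.toNat)[yn] = l[xn][yn] := List.getElem_take
    exact h2 ▸ List.getElem_mem h1
  have hcell := hcells _ hcellmem
  have hchar : vrmChar c l xn yn = PySem.List.pyGetD l[xn][yn].toList c 'I' := by
    unfold vrmChar
    rw [PySem.List.pyGetD_natCast l xn [], List.getD_eq_getElem?_getD,
      List.getElem?_eq_getElem hxlen]
    simp only [Option.getD_some]
    rw [PySem.List.pyGetD_natCast _ yn "", List.getD_eq_getElem?_getD,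
      List.getElem?_eq_getElem hylen]
    simp
  rw [hchar]
  unfold vrmGoodCell at hcell
  rcases hts : l[xn][yn].toList with _ | ⟨a, _ | ⟨b, _ | ⟨cc, rest⟩⟩⟩ <;> rw [hts] at hcell <;>
    simp only [] at hcell
  · simp at hcell
  · simp at hcell
  · simp at hcell
  · rw [Bool.and_eq_true, Bool.and_eq_true] at hcell
    obtain ⟨⟨ha, hb⟩, hcc⟩ := hcell
    rcases hc with rfl | rfl | rfl
    · rw [show ((0 : Int)) = ((0 : Nat) : Int) by simp, PySem.List.pyGetD_natCast]
      simpa using ha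
    · rw [show ((1 : Int)) = ((1 : Nat) : Int) by simp, PySem.List.pyGetD_natCast]
      simpa using hb
    · rw [show ((2 : Int)) = ((2 : Nat) : Int) by simp, PySem.List.pyGetD_natCast]
      simpa using hcc

-- per-layer agreement of A's mapping with B's step array, on every in-range index
def vrmLayerOK (m c : Int) (l : List (List String)) : Prop :=
  ∀ v : Int, 0 ≤ v → v < m * m →
    PySem.List.pyGetD (vrmMapping m c (vrmIdx m) l) v none
        = some (PySem.List.pyGetD (vrmStepB m c l) v 0)
      ∧ 0 ≤ PySem.List.pyGetD (vrmStepB m c l) v 0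
      ∧ PySem.List.pyGetD (vrmStepB m c l) v 0 < m * m

lemma vrm_layer_ok (m c : Int) (layers : List (List (List String))) (hm : 0 < m)
    (hWF : vrmWF m layers = true) (hc : c = 0 ∨ c = 1 ∨ c = 2)
    (l : List (List String)) (hl : l ∈ layers) : vrmLayerOK m c l := by
  intro v h0 h1
  set M := m.toNat with hMdef
  have hmM : m = (M : Int) := by omega
  have hn : (m * m : Int) = ((M * M : Nat) : Int) := by rw [hmM]; push_cast; ring
  have hvn' : v < ((M * M : Nat) : Int) := hn ▸ h1
  set vn := v.toNat with hvndef
  have hveq : v = (vn : Int) := by omega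
  have hvn : vn < M * M := by omega
  have hM0 : 0 < M := by omega
  set xn := vn / M with hxndef
  set yn := vn % M with hyndef
  have hxn : xn < M := by
    rw [hxndef]
    exact Nat.div_lt_of_lt_mul (by omega)
  have hyn : yn < M := Nat.mod_lt _ hM0
  have hv : xn * M + yn = vn := by
    rw [hxndef, hyndef, Nat.mul_comm]
    exact Nat.div_add_mod vn M
  have hrw : v = ((xn * M + yn : Nat) : Int) := by omega
  rw [hrw]
  have hgood := vrm_good_char m c layers hm hWF hc l hl xn yn hxn hyn
  rw [vrm_mapping_eq_tgt m c l hm xn yn hxn hyn hgood,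
    vrm_stepB_getD m c l xn yn hxn hyn]
  have hrange := vrm_tgt_range m c l hm (xn : Int) (yn : Int)
    (by positivity) (by omega) (by positivity) (by omega)
  exact ⟨rfl, hrange.1, hrange.2⟩

lemma vrm_compose_aux (m c : Int) :
    ∀ (ls : List (List (List String))), (∀ l ∈ ls, vrmLayerOK m c l) →
    ∀ (perm : List (Option Int)) (φ : Int → Int),
      (∀ i : Int, 0 ≤ i → i < m * m →
        PySem.List.pyGetD perm i none = some (φ i) ∧ 0 ≤ φ i ∧ φ i < m * m) →
    ∀ i : Int, 0 ≤ i → i < m * m →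
      PySem.List.pyGetD
          (ls.foldl (fun perm s_layer =>
            let mapping := vrmMapping m c (vrmIdx m) s_layer
            perm.map (fun p => p.bind (fun q => PySem.List.pyGetD mapping q none))) perm)
          i none
        = some (vrmThread (ls.map (vrmStepB m c)) (φ i))
      ∧ 0 ≤ vrmThread (ls.map (vrmStepB m c)) (φ i)
      ∧ vrmThread (ls.map (vrmStepB m c)) (φ i) < m * m := by
  intro ls
  induction ls with
  | nil =>
    intro _ perm φ hφ i h0 h1
    exact hφ i h0 h1
  | cons l ls ih =>
    intro hok perm φ hφ i h0 h1
    have hlok := hok l List.mem_cons_self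
    have hok' := fun a ha => hok a (List.mem_cons_of_mem l ha)
    simp only [List.foldl_cons]
    have hφ' : ∀ j : Int, 0 ≤ j → j < m * m →
        PySem.List.pyGetD
            (perm.map (fun p => p.bind
              (fun q => PySem.List.pyGetD (vrmMapping m c (vrmIdx m) l) q none))) j none
          = some (PySem.List.pyGetD (vrmStepB m c l) (φ j) 0)
        ∧ 0 ≤ PySem.List.pyGetD (vrmStepB m c l) (φ j) 0
        ∧ PySem.List.pyGetD (vrmStepB m c l) (φ j) 0 < m * m := by
      intro j j0 j1
      obtain ⟨hpj, hφ0, hφ1⟩ := hφ j j0 j1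
      obtain ⟨hmap, hs0, hs1⟩ := hlok (φ j) hφ0 hφ1
      refine ⟨?_, hs0, hs1⟩
      rw [show PySem.List.pyGetD
            (perm.map (fun p => p.bind
              (fun q => PySem.List.pyGetD (vrmMapping m c (vrmIdx m) l) q none))) j none
          = PySem.List.pyGetD
            (perm.map (fun p => p.bind
              (fun q => PySem.List.pyGetD (vrmMapping m c (vrmIdx m) l) q none))) j
            ((fun p : Option Int => p.bind
              (fun q => PySem.List.pyGetD (vrmMapping m c (vrmIdx m) l) q none)) none) from rfl,
        PySem.List.pyGetD_map, hpj]
      simpa using hmap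
    have := ih hok' _ (fun j => PySem.List.pyGetD (vrmStepB m c l) (φ j) 0) hφ' i h0 h1
    simpa [vrmThread] using this

lemma vrm_compose_thread (m c : Int) (layers : List (List (List String)))
    (hL : ∀ l ∈ layers, vrmLayerOK m c l) :
    ∀ i : Int, 0 ≤ i → i < m * m →
      PySem.List.pyGetD (vrmCompose m c layers) i none
          = some (vrmThread (layers.map (vrmStepB m c)) i)
        ∧ 0 ≤ vrmThread (layers.map (vrmStepB m c)) i
        ∧ vrmThread (layers.map (vrmStepB m c)) i < m * m := by
  intro i h0 h1
  unfold vrmCompose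
  exact vrm_compose_aux m c layers hL _ (fun j => j)
    (fun j j0 j1 =>
      ⟨by rw [PySem.List.pyGetD_map_pyRange_of_nonneg some (m * m) j none j0 j1], j0, j1⟩)
    i h0 h1

lemma vrm_walk_eq (perm : List (Option Int)) (steps : List (List Int)) (n : Int)
    (hstep : ∀ v : Int, 0 ≤ v → v < n →
      PySem.List.pyGetD perm v none = some (vrmThread steps v)
        ∧ 0 ≤ vrmThread steps v ∧ vrmThread steps v < n) :
    ∀ (fuel : Nat) (seen : List Bool) (cur : Int), 0 ≤ cur → cur < n →
      vrmWalkA perm fuel seen cur = vrmWalkB steps fuel seen cur := by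
  intro fuel
  induction fuel with
  | zero => intro seen cur _ _; rfl
  | succ fuel ih =>
    intro seen cur h0 h1
    unfold vrmWalkA vrmWalkB
    split
    · rfl
    · obtain ⟨heq, hlo, hhi⟩ := hstep cur h0 h1
      rw [heq]
      simp only [Option.getD_some]
      exact ih _ _ hlo hhi

lemma vrm_count_eq (perm : List (Option Int)) (steps : List (List Int)) (n : Int)
    (hstep : ∀ v : Int, 0 ≤ v → v < n →
      PySem.List.pyGetD perm v none = some (vrmThread steps v)
        ∧ 0 ≤ vrmThread steps v ∧ vrmThread steps v < n) :
    vrmCountA perm n = vrmCountB steps n := by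
  unfold vrmCountA vrmCountB
  have haux : ∀ (is : List Int), (∀ i ∈ is, 0 ≤ i ∧ i < n) → ∀ st : List Bool × Int,
      is.foldl (fun st i =>
        if PySem.List.pyGetD st.1 i true then st
        else (vrmWalkA perm (st.1.length + 1) st.1 i, st.2 + 1)) st
      = is.foldl (fun st i =>
        if PySem.List.pyGetD st.1 i true then st
        else (vrmWalkB steps (st.1.length + 1) st.1 i, st.2 + 1)) st := by
    intro is
    induction is with
    | nil => intro _ st; rfl
    | cons i t ih =>
      intro hmem st
      simp only [List.foldl_cons]
      have hi := hmem i List.mem_cons_self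
      have ht := fun j hj => hmem j (List.mem_cons_of_mem i hj)
      split
      · exact ih ht st
      · rw [vrm_walk_eq perm steps n hstep (st.1.length + 1) st.1 i hi.1 hi.2]
        exact ih ht _
  rw [haux (PySem.List.pyRange 0 n)
    (fun i hi => by rw [PySem.List.mem_pyRange_one] at hi; exact hi)]

lemma vrm_color_eq (m : Int) (layers : List (List (List String)))
    (hpre : Pre_verify_round_maps m layers) (c : Int) (hc : c = 0 ∨ c = 1 ∨ c = 2) :
    vrmCountA (vrmCompose m c layers) (m * m)
      = vrmCountB (layers.map (vrmStepB m c)) (m * m) := by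
  have hL : ∀ l ∈ layers, vrmLayerOK m c l := by
    rcases hpre with rfl | rfl | ⟨hm, hWF⟩
    · intro l hl; cases hl
    · intro l hl v h0 h1
      exact absurd h1 (by omega)
    · exact fun l hl => vrm_layer_ok m c layers hm hWF hc l hl
  exact vrm_count_eq _ _ _ (vrm_compose_thread m c layers hL)

lemma vrm_colors_eq (m : Int) (layers : List (List (List String))) :
    ∀ cs : List Int,
      (∀ c ∈ cs, vrmCountA (vrmCompose m c layers) (m * m)
        = vrmCountB (layers.map (vrmStepB m c)) (m * m)) →
      vrmColorsA m layers cs = vrmColorsB m layers cs := by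
  intro cs
  induction cs with
  | nil => intro _; rfl
  | cons c rest ih =>
    intro h
    have hc := h c List.mem_cons_self
    have hrest := fun d hd => h d (List.mem_cons_of_mem c hd)
    simp only [vrmColorsA, vrmColorsB, hc]
    split
    · rfl
    · exact ih hrest

-- ===== VERDICT (by name: the statement is the Claim_ definition above) =====
theorem verify_round_maps_spec : Claim_equal_verify_round_maps := by
  intro m layers _ hpre
  unfold Spec_verify_round_maps verify_round_maps verify_round_maps_alt
  exact vrm_colors_eq m layers _ (by
    intro c hc
    have hc3 : c = 0 ∨ c = 1 ∨ c = 2 := by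
      have h3 : PySem.List.pyRange 0 3 = [0, 1, 2] := by decide
      rw [h3] at hc; simpa using hc
    exact vrm_color_eq m layers hpre c hc3)
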